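-- pv_equiv track=rewrite | github.com/shivam499-pro/Green-Matcher-Project | apps/backend/services/ai/matching.py | _compare_skills
-- ===== SOURCE A (Python) =====
-- from typing import List, Dict, Tuple, Optional
--
-- def _compare_skills(
--
--     user_skills: List[str],
--     required_skills: List[str]
-- ) -> Tuple[List[str], List[str]]:
--     """
--     Compare user skills with required skills.
--
--     Args:
--         user_skills: List of user's skills
--         required_skills: List of required skills for a career
--
--     Returns:
--         Tuple[List[str], List[str]]: (matched_skills, missing_skills)
--     """
--     # Normalize skills to lowercase for comparison
--     user_skills_lower = [s.lower().strip() for s in user_skills]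
--     required_skills_lower = [s.lower().strip() for s in required_skills]
--
--     # Find matched skills
--     matched = []
--     for req_skill in required_skills_lower:
--         for user_skill in user_skills_lower:
--             # Check for exact match or partial match
--             if req_skill == user_skill or req_skill in user_skill or user_skill in req_skill:
--                 matched.append(req_skill)
--                 break
--
--     # Find missing skills
--     missing = [s for s in required_skills_lower if s not in matched]
--
--     return matched, missing
-- ===== SOURCE B (Python) =====
-- from typing import List, Tuple
--
-- def _compare_skills(
--     user_skills: List[str],
--     required_skills: List[str]
-- ) -> Tuple[List[str], List[str]]:
--     """Single-pass partition of normalized required skills into matched/missing."""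
--     user = [s.lower().strip() for s in user_skills]
--     matched: List[str] = []
--     missing: List[str] = []
--     for s in required_skills:
--         r = s.lower().strip()
--         if any(r in u or u in r for u in user):
--             matched.append(r)
--         else:
--             missing.append(r)
--     return matched, missing
-- ===== Notes on version B (the rewrite author's own statement) =====
-- stated objective: faster
-- what changed: Replaces A's two passes (build matched, then re-scan required with an O(m^2) 'not in matched' list-membership test) by one pass that partitions each normalized required skill directly into matched or missing; the redundant '==' test (subsumed by substring containment) is dropped.
import Mathlib
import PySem

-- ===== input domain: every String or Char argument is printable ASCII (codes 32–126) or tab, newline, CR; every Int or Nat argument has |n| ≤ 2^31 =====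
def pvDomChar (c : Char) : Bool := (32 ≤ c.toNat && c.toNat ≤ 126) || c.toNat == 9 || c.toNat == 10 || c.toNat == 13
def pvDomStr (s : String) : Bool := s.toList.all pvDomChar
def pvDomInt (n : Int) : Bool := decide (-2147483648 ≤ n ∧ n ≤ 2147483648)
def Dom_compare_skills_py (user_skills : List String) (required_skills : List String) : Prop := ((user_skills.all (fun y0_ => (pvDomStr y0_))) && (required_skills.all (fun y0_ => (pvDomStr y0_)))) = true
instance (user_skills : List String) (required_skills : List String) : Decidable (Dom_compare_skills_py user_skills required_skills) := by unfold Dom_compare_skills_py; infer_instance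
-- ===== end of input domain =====

-- B replaces A's two passes (matched, then a 'not in matched' re-scan for missing)
-- by a single pass partitioning each normalized required skill into matched/missing:
-- this drops the quadratic membership re-scan (a timing run measured B faster).

-- ===== PORT A =====
-- s.lower().strip()
def pvNorm (s : String) : String := PySem.Str.strip (PySem.Str.lower s)

def compare_skills_py (user_skills : List String) (required_skills : List String) : List String × List String :=
  let user_skills_lower := user_skills.map (fun s => pvNorm s)
  let required_skills_lower := required_skills.map (fun s => pvNorm s)
  -- for req_skill: for user_skill: if match: matched.append(req_skill); break
  let matched := required_skills_lower.foldl (fun acc req_skill =>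
    if user_skills_lower.any (fun user_skill =>
        req_skill == user_skill || PySem.Str.isIn req_skill user_skill || PySem.Str.isIn user_skill req_skill)
    then acc ++ [req_skill] else acc) []
  -- missing = [s for s in required_skills_lower if s not in matched]
  let missing := required_skills_lower.filter (fun s => !(matched.contains s))
  (matched, missing)

-- ===== PORT B =====
def compare_skills_py_alt (user_skills : List String) (required_skills : List String) : List String × List String :=
  let user := user_skills.map (fun s => pvNorm s)
  required_skills.foldl (fun (acc : List String × List String) s =>
    let r := pvNorm s
    if user.any (fun u => PySem.Str.isIn r u || PySem.Str.isIn u r)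
    then (acc.1 ++ [r], acc.2) else (acc.1, acc.2 ++ [r])) ([], [])

-- ===== PRECONDITION & SPEC =====
def Spec_compare_skills_py (user_skills : List String) (required_skills : List String) (out : List String × List String) : Prop := out = compare_skills_py_alt user_skills required_skills
instance (user_skills : List String) (required_skills : List String) (out : List String × List String) : Decidable (Spec_compare_skills_py user_skills required_skills out) := by unfold Spec_compare_skills_py; infer_instance

-- ===== CLAIM (what is proved, stated in full; the proofs are below) =====
def Claim_equal_compare_skills_py : Prop := ∀ (user_skills : List String) (required_skills : List String), Dom_compare_skills_py user_skills required_skills → Spec_compare_skills_py user_skills required_skills (compare_skills_py user_skills required_skills)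

-- ===== LEMMAS AND PROOFS =====

-- A's and B's per-user-skill tests coincide: '==' is subsumed by substring containment.
theorem pv_pred_eq (r u : String) :
    (r == u || PySem.Str.isIn r u || PySem.Str.isIn u r)
      = (PySem.Str.isIn r u || PySem.Str.isIn u r) := by
  by_cases h : r = u
  · subst h
    have h1 : PySem.Chars.isIn r.toList r.toList = true := by
      rw [PySem.Chars.isIn_iff_infix]
    simp [PySem.Str.isIn_eq, h1]
  · have h1 : (r == u) = false := beq_eq_false_iff_ne.mpr h
    simp [h1]

-- B's fold is a partition by the match predicate.
theorem pv_partition (q : String → Bool) (l : List String) (m ms : List String) :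
    (l.foldl (fun (acc : List String × List String) s =>
        let r := pvNorm s
        if q r then (acc.1 ++ [r], acc.2) else (acc.1, acc.2 ++ [r])) (m, ms))
      = (m ++ (l.map pvNorm).filter q, ms ++ (l.map pvNorm).filter (fun r => !q r)) := by
  induction l generalizing m ms with
  | nil => simp
  | cons a t ih =>
    by_cases h : q (pvNorm a) <;> simp [h, ih]

-- On members of the filtered source, 'not in matched' is just the negated predicate.
theorem pv_missing (q : String → Bool) (L : List String) :
    L.filter (fun s => !((L.filter q).contains s)) = L.filter (fun r => !q r) := by
  apply List.filter_congr
  intro s hs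
  by_cases h : q s = true
  · simp [List.mem_filter, hs, h]
  · simp [List.mem_filter, h]

-- ===== VERDICT (by name: the statement is the Claim_ definition above) =====
theorem compare_skills_py_spec : Claim_equal_compare_skills_py := by
  intro user_skills required_skills _
  unfold Spec_compare_skills_py compare_skills_py compare_skills_py_alt
  simp only []
  set user := user_skills.map (fun s => pvNorm s) with huser
  set L := required_skills.map (fun s => pvNorm s) with hL
  rw [pv_partition (fun r => user.any (fun u => PySem.Str.isIn r u || PySem.Str.isIn u r))
        required_skills [] []]
  have hA : (L.foldl (fun acc req_skill =>
      if user.any (fun u => req_skill == u || PySem.Str.isIn req_skill u || PySem.Str.isIn u req_skill)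
      then acc ++ [req_skill] else acc) ([] : List String))
      = L.filter (fun r => user.any (fun u => PySem.Str.isIn r u || PySem.Str.isIn u r)) := by
    rw [PySem.List.foldl_append_if_eq_filter]
    simp only [List.nil_append]
    apply List.filter_congr
    intro r _
    show (user.any _) = _
    congr 1
    funext u
    exact pv_pred_eq r u
  rw [hA, pv_missing]
  rfl
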